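-- pv_equiv track=rewrite | github.com/tvproductions/gzkit | src/gzkit/commands/config_paths.py | _is_path_covered_by_manifest
-- ===== SOURCE A (Python) =====
-- def _is_path_covered_by_manifest(literal: str, manifest_paths: set[str]) -> bool:
--     """Check if a path literal is covered by any manifest entry.
--
--     A literal is covered if it exactly matches, is a prefix of, or is a
--     suffix of a known manifest path.
--     """
--     normalized = literal.strip("/").replace("\\", "/")
--     for mp in manifest_paths:
--         if normalized == mp:
--             return True
--         if normalized.startswith(mp + "/") or mp.startswith(normalized + "/"):
--             return True
--     return False
-- ===== SOURCE B (Python) =====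
-- def _is_path_covered_by_manifest(literal: str, manifest_paths: set[str]) -> bool:
--     """Prefix-index variant: build the set of all cumulative '/'-prefixes of the
--     normalized path (covering exact-match and ancestor cases via one set
--     intersection), then scan only for the descendant case."""
--     normalized = literal.strip("/").replace("\\", "/")
--     prefixes = set()
--     acc = ""
--     for ch in normalized:
--         if ch == "/":
--             prefixes.add(acc)
--         acc += ch
--     prefixes.add(normalized)
--     if not prefixes.isdisjoint(manifest_paths):
--         return True
--     child_marker = normalized + "/"
--     return any(mp.startswith(child_marker) for mp in manifest_paths)
-- ===== Notes on version B (the rewrite author's own statement) =====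
-- stated objective: alternative
-- what changed: A's single fused scan testing three string comparisons per manifest entry is replaced by building the set of all cumulative '/'-prefixes of the normalized path in one character pass, answering the exact-match and ancestor cases by one set-disjointness test against the manifest, and scanning the manifest only for the descendant case.
import Mathlib
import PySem

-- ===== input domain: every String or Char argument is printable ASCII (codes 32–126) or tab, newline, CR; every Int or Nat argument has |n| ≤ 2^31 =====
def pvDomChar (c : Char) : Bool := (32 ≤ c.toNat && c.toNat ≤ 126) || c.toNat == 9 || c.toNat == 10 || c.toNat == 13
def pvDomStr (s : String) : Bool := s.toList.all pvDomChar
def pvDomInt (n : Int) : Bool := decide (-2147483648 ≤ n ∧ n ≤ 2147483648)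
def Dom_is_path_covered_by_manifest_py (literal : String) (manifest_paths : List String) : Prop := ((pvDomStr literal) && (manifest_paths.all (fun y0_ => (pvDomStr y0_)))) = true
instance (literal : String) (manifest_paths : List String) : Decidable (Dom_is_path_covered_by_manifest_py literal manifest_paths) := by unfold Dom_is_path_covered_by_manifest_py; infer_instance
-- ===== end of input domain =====

-- B replaces A's single fused scan by a prefix-index set (all cumulative '/'-prefixes of the
-- normalized path) intersected with the manifest, plus a narrower scan for the descendant case;
-- objective: alternative decomposition (return value proved equal; no speed claim).


-- ===== PORT A =====
-- the for-loop with early returns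
def pvALoop (normalized : String) : List String → Bool
  | [] => false
  | mp :: rest =>
    if normalized == mp then true
    else if PySem.Str.startswith normalized (mp ++ "/") || PySem.Str.startswith mp (normalized ++ "/") then true
    else pvALoop normalized rest

def is_path_covered_by_manifest_py (literal : String) (manifest_paths : List String) : Bool :=
  let normalized := PySem.Str.replace (PySem.Str.stripChars literal "/") "\\" "/"
  pvALoop normalized manifest_paths

-- ===== PORT B =====
-- the character loop of Source B building the prefix set (strings carried as List Char)
def pvPrefLoop : PySem.Set (List Char) → List Char → List Char → PySem.Set (List Char)
  | prefixes, _, [] => prefixes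
  | prefixes, acc, ch :: rest =>
    pvPrefLoop (if ch = '/' then PySem.Set.add prefixes acc else prefixes) (acc ++ [ch]) rest

def is_path_covered_by_manifest_py_alt (literal : String) (manifest_paths : List String) : Bool :=
  let normalized := PySem.Str.replace (PySem.Str.stripChars literal "/") "\\" "/"
  let n := normalized.toList
  let prefixes := PySem.Set.add (pvPrefLoop PySem.Set.empty [] n) n
  if !(PySem.Set.isdisjoint prefixes (manifest_paths.map String.toList)) then true
  else
    let childMarker := n ++ ['/']
    manifest_paths.any (fun mp => PySem.Chars.startswith mp.toList childMarker)

-- ===== PRECONDITION & SPEC =====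
def Spec_is_path_covered_by_manifest_py (literal : String) (manifest_paths : List String) (out : Bool) : Prop := out = is_path_covered_by_manifest_py_alt literal manifest_paths
instance (literal : String) (manifest_paths : List String) (out : Bool) : Decidable (Spec_is_path_covered_by_manifest_py literal manifest_paths out) := by unfold Spec_is_path_covered_by_manifest_py; infer_instance

-- ===== CLAIM (what is proved, stated in full; the proofs are below) =====
def Claim_equal_is_path_covered_by_manifest_py : Prop := ∀ (literal : String) (manifest_paths : List String), Dom_is_path_covered_by_manifest_py literal manifest_paths → Spec_is_path_covered_by_manifest_py literal manifest_paths (is_path_covered_by_manifest_py literal manifest_paths)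

-- ===== LEMMAS AND PROOFS =====

lemma pvALoop_eq_any (normalized : String) (mps : List String) :
    pvALoop normalized mps
      = mps.any (fun mp => (normalized == mp)
          || (PySem.Str.startswith normalized (mp ++ "/") || PySem.Str.startswith mp (normalized ++ "/"))) := by
  induction mps with
  | nil => rfl
  | cons mp rest ih =>
    have hite : ∀ (a b : Bool), (if a = true then true else b) = (a || b) := by
      intro a b; cases a <;> simp
    simp only [pvALoop, hite, List.any_cons, ih, Bool.or_assoc]

lemma mem_pvPrefLoop (rest : List Char) :
    ∀ (prefixes : PySem.Set (List Char)) (acc p : List Char),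
      p ∈ pvPrefLoop prefixes acc rest
        ↔ p ∈ prefixes ∨ (acc <+: p ∧ p ++ ['/'] <+: acc ++ rest) := by
  induction rest with
  | nil =>
    intro prefixes acc p
    simp only [pvPrefLoop, List.append_nil]
    constructor
    · intro h; exact Or.inl h
    · rintro (h | ⟨h1, h2⟩)
      · exact h
      · have l1 := h1.length_le
        have l2 := h2.length_le
        simp at l2
        omega
  | cons ch rest ih =>
    intro prefixes acc p
    simp only [pvPrefLoop, ih]
    have hassoc : (acc ++ [ch]) ++ rest = acc ++ ch :: rest := by simp
    constructor
    · rintro (hmem | ⟨h1, h2⟩)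
      · by_cases hch : ch = '/'
        · rw [if_pos hch, PySem.Set.mem_add] at hmem
          rcases hmem with hmem | rfl
          · exact Or.inl hmem
          · refine Or.inr ⟨List.prefix_refl _, ?_⟩
            rw [hch]
            exact (List.prefix_append_right_inj _).mpr
              (List.cons_prefix_cons.mpr ⟨rfl, List.nil_prefix⟩)
        · rw [if_neg hch] at hmem
          exact Or.inl hmem
      · refine Or.inr ⟨(List.prefix_append acc [ch]).trans h1, ?_⟩
        rw [← hassoc]; exact h2
    · rintro (hmem | ⟨h1, h2⟩)
      · left
        by_cases hch : ch = '/'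
        · rw [if_pos hch, PySem.Set.mem_add]; exact Or.inl hmem
        · rw [if_neg hch]; exact hmem
      · obtain ⟨q, rfl⟩ := h1
        rw [List.append_assoc] at h2
        have h2' : q ++ ['/'] <+: ch :: rest := (List.prefix_append_right_inj acc).mp h2
        cases q with
        | nil =>
          simp only [List.nil_append] at h2'
          have hch : '/' = ch := (List.cons_prefix_cons.mp h2').1
          left
          rw [if_pos hch.symm, PySem.Set.mem_add]
          right; simp
        | cons c q' =>
          have hc : c = ch := (List.cons_prefix_cons.mp (by simpa using h2')).1
          have hq' : q' ++ ['/'] <+: rest := (List.cons_prefix_cons.mp (by simpa using h2')).2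
          right
          constructor
          · exact (List.prefix_append_right_inj acc).mpr
              (List.cons_prefix_cons.mpr ⟨hc.symm, List.nil_prefix⟩)
          · rw [hassoc, List.append_assoc]
            exact (List.prefix_append_right_inj acc).mpr
              (List.cons_prefix_cons.mpr ⟨hc, hq'⟩)

lemma mem_prefixSet (n p : List Char) :
    p ∈ PySem.Set.add (pvPrefLoop PySem.Set.empty [] n) n ↔ p = n ∨ p ++ ['/'] <+: n := by
  rw [PySem.Set.mem_add, mem_pvPrefLoop]
  simp only [PySem.Set.empty, List.not_mem_nil, false_or, List.nil_prefix, true_and,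
    List.nil_append]
  tauto

lemma string_eq_iff_toList (s t : String) : s = t ↔ s.toList = t.toList := by
  constructor
  · intro h; rw [h]
  · intro h; exact String.ext h

-- per-element condition of A's loop, in List-Char form
lemma aCond_iff (norm mp : String) :
    ((norm == mp)
      || (PySem.Str.startswith norm (mp ++ "/") || PySem.Str.startswith mp (norm ++ "/"))) = true
    ↔ (mp.toList = norm.toList ∨ mp.toList ++ ['/'] <+: norm.toList)
      ∨ norm.toList ++ ['/'] <+: mp.toList := by
  have he : (norm = mp) ↔ mp.toList = norm.toList := by
    rw [string_eq_iff_toList]; exact eq_comm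
  have hs : ("/" : String).toList = ['/'] := rfl
  simp only [Bool.or_eq_true, beq_iff_eq, PySem.Str.startswith_eq, String.toList_append, hs,
    PySem.Chars.startswith_iff, he]
  tauto

lemma notdisjoint_iff (norm : String) (mps : List String) :
    PySem.Set.isdisjoint (PySem.Set.add (pvPrefLoop PySem.Set.empty [] norm.toList) norm.toList)
        (mps.map String.toList) = false
    ↔ ∃ mp ∈ mps, mp.toList = norm.toList ∨ mp.toList ++ ['/'] <+: norm.toList := by
  constructor
  · intro hd
    by_contra hno
    have : PySem.Set.isdisjoint (PySem.Set.add (pvPrefLoop PySem.Set.empty [] norm.toList)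
        norm.toList) (mps.map String.toList) = true := by
      rw [PySem.Set.isdisjoint_iff]
      intro x hx hxt
      rw [mem_prefixSet] at hx
      rw [List.mem_map] at hxt
      obtain ⟨mp, hmp, rfl⟩ := hxt
      exact hno ⟨mp, hmp, hx⟩
    rw [this] at hd; cases hd
  · rintro ⟨mp, hmp, hcov⟩
    by_contra hne
    have ht : PySem.Set.isdisjoint (PySem.Set.add (pvPrefLoop PySem.Set.empty [] norm.toList)
        norm.toList) (mps.map String.toList) = true := by
      cases h : PySem.Set.isdisjoint (PySem.Set.add (pvPrefLoop PySem.Set.empty [] norm.toList)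
          norm.toList) (mps.map String.toList)
      · exact absurd h hne
      · rfl
    rw [PySem.Set.isdisjoint_iff] at ht
    exact ht mp.toList ((mem_prefixSet _ _).mpr hcov) (List.mem_map_of_mem hmp)

lemma alt_eq_loop (norm : String) (mps : List String) :
    (if !(PySem.Set.isdisjoint
            (PySem.Set.add (pvPrefLoop PySem.Set.empty [] norm.toList) norm.toList)
            (mps.map String.toList)) then true
     else mps.any (fun mp => PySem.Chars.startswith mp.toList (norm.toList ++ ['/'])))
    = pvALoop norm mps := by
  have hite : ∀ (c x : Bool), (if (!c) = true then true else x) = (!c || x) := by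
    intro c x; cases c <;> simp
  rw [pvALoop_eq_any, hite, Bool.eq_iff_iff]
  cases hd : PySem.Set.isdisjoint
      (PySem.Set.add (pvPrefLoop PySem.Set.empty [] norm.toList) norm.toList)
      (mps.map String.toList)
  · simp only [Bool.not_false, Bool.true_or, true_iff]
    obtain ⟨mp, hmp, hcov⟩ := (notdisjoint_iff norm mps).mp hd
    rw [List.any_eq_true]
    exact ⟨mp, hmp, (aCond_iff norm mp).mpr (Or.inl hcov)⟩
  · simp only [Bool.not_true, Bool.false_or]
    rw [List.any_eq_true, List.any_eq_true]
    constructor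
    · rintro ⟨mp, hmp, hc⟩
      rw [PySem.Chars.startswith_iff] at hc
      exact ⟨mp, hmp, (aCond_iff norm mp).mpr (Or.inr hc)⟩
    · rintro ⟨mp, hmp, hc⟩
      rcases (aCond_iff norm mp).mp hc with hcov | hdesc
      · exfalso
        have hfalse : PySem.Set.isdisjoint
            (PySem.Set.add (pvPrefLoop PySem.Set.empty [] norm.toList) norm.toList)
            (mps.map String.toList) = false := (notdisjoint_iff norm mps).mpr ⟨mp, hmp, hcov⟩
        rw [hd] at hfalse; cases hfalse
      · exact ⟨mp, hmp, by rw [PySem.Chars.startswith_iff]; exact hdesc⟩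

-- ===== VERDICT (by name: the statement is the Claim_ definition above) =====
theorem is_path_covered_by_manifest_py_spec : Claim_equal_is_path_covered_by_manifest_py := by
  intro literal manifest_paths _
  unfold Spec_is_path_covered_by_manifest_py
  show is_path_covered_by_manifest_py literal manifest_paths
      = is_path_covered_by_manifest_py_alt literal manifest_paths
  simp only [is_path_covered_by_manifest_py, is_path_covered_by_manifest_py_alt]
  exact (alt_eq_loop (PySem.Str.replace (PySem.Str.stripChars literal "/") "\\" "/")
    manifest_paths).symm
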